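-- pv_equiv track=rewrite | github.com/YeLLoLS/Data-Encoding-Python | main.py | mlt33
-- ===== SOURCE A (Python) =====
-- def mlt33(list_of_givenBits):
--     output = [0]
--     last_changed = 0
--
--     for bit in list_of_givenBits:
--         if bit == 1 and (output[-1] == 1 or (output[-1] == 0 and output[-1] < last_changed)):
--             last_changed = output[-1]
--             output.append(output[-1] - 1)
--         elif bit == 1:
--             last_changed = output[-1]
--             output.append(output[-1] + 1)
--         elif bit == 0:
--             output.append(output[-1])
--
--     return output[1:]
-- ===== SOURCE B (Python) =====
-- LEVELS = [0, 1, 0, -1]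
--
-- def mlt33(list_of_givenBits):
--     phase = 0
--     output = []
--     for bit in list_of_givenBits:
--         if bit == 1:
--             phase = (phase + 1) % 4
--             output.append(LEVELS[phase])
--         elif bit == 0:
--             output.append(LEVELS[phase])
--     return output
-- ===== Notes on version B (the rewrite author's own statement) =====
-- stated objective: simpler
-- what changed: B replaces A's seeded output list, negative indexing and (value, last_changed) direction arithmetic with a single phase counter mod 4 indexing a fixed four-entry level table, appending directly to the result (no seed element to strip).
import Mathlib
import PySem

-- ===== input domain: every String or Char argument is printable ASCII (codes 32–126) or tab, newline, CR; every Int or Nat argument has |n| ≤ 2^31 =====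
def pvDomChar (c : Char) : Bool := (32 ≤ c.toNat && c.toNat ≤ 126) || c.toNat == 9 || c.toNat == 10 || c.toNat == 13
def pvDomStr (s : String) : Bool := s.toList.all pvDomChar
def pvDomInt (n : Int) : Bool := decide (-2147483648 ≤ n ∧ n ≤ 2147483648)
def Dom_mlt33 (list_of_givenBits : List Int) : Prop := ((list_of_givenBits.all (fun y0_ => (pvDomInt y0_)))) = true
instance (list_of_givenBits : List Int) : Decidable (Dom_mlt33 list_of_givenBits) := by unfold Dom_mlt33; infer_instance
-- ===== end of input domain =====

-- B replaces A's seeded output list and (value, last_changed) direction arithmetic with a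
-- phase counter mod 4 indexing a fixed level table; no seed element to strip. Same cost.

-- ===== PORT A =====
-- one iteration of A's for-loop; state = (output, last_changed); output[-1] via pyGetD (always in range)
def mlt33Step (st : List Int × Int) (bit : Int) : List Int × Int :=
  let output := st.1
  let last_changed := st.2
  let lastv := PySem.List.pyGetD output (-1) 0
  if bit == 1 && (lastv == 1 || (lastv == 0 && decide (lastv < last_changed))) then
    (output ++ [lastv - 1], lastv)
  else if bit == 1 then
    (output ++ [lastv + 1], lastv)
  else if bit == 0 then
    (output ++ [lastv], last_changed)
  else
    (output, last_changed)

def mlt33 (list_of_givenBits : List Int) : List Int :=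
  (list_of_givenBits.foldl mlt33Step ([0], 0)).1.tail   -- output[1:]

-- ===== PORT B =====
def pvLEVELS : List Int := [0, 1, 0, -1]

-- one iteration of B's for-loop; state = (phase, output)
def mlt33AltStep (st : Int × List Int) (bit : Int) : Int × List Int :=
  if bit == 1 then
    let p := PySem.Int.mod (st.1 + 1) 4
    (p, st.2 ++ [PySem.List.pyGetD pvLEVELS p 0])
  else if bit == 0 then
    (st.1, st.2 ++ [PySem.List.pyGetD pvLEVELS st.1 0])
  else
    st

def mlt33_alt (list_of_givenBits : List Int) : List Int :=
  (list_of_givenBits.foldl mlt33AltStep (0, [])).2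

-- ===== PRECONDITION & SPEC =====
def Spec_mlt33 (list_of_givenBits : List Int) (out : List Int) : Prop := out = mlt33_alt list_of_givenBits
instance (list_of_givenBits : List Int) (out : List Int) : Decidable (Spec_mlt33 list_of_givenBits out) := by unfold Spec_mlt33; infer_instance

-- ===== CLAIM (what is proved, stated in full; the proofs are below) =====
def Claim_equal_mlt33 : Prop := ∀ (list_of_givenBits : List Int), Dom_mlt33 list_of_givenBits → Spec_mlt33 list_of_givenBits (mlt33 list_of_givenBits)

-- ===== LEMMAS AND PROOFS =====

-- how A's state (last element of output, last_changed) corresponds to B's phase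
def pvRel (v last phase : Int) : Prop :=
  (phase = 0 ∧ v = 0 ∧ ¬ (v < last)) ∨
  (phase = 1 ∧ v = 1) ∨
  (phase = 2 ∧ v = 0 ∧ v < last) ∨
  (phase = 3 ∧ v = -1)

-- B's accumulator is only appended to
lemma mlt33AltStep_prefix (l : List Int) (p : Int) (acc : List Int) :
    (l.foldl mlt33AltStep (p, acc)).2 = acc ++ (l.foldl mlt33AltStep (p, [])).2 := by
  induction l generalizing p acc with
  | nil => simp
  | cons b l ih =>
    simp only [List.foldl_cons]
    by_cases h1 : b == 1
    · simp only [mlt33AltStep, h1, if_pos, List.nil_append]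
      rw [ih, ih (acc := [_])]; simp
    · by_cases h0 : b == 0
      · simp only [mlt33AltStep, h1, h0, Bool.false_eq_true, if_false, if_true, List.nil_append]
        rw [ih, ih (acc := [_])]; simp
      · simp only [mlt33AltStep, h1, h0]
        simp only [Bool.false_eq_true, if_false]
        exact ih p acc

lemma key (l : List Int) : ∀ (ys : List Int) (v last phase : Int), pvRel v last phase →
    (l.foldl mlt33Step (ys ++ [v], last)).1 = ys ++ [v] ++ (l.foldl mlt33AltStep (phase, [])).2 := by
  induction l with
  | nil => intro ys v last phase _; simp
  | cons b l ih =>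
    intro ys v last phase hrel
    simp only [List.foldl_cons]
    have hlast : PySem.List.pyGetD (ys ++ [v]) (-1) 0 = v :=
      PySem.List.pyGetD_neg_one_append_singleton ys v 0
    by_cases h1 : b == 1
    · -- bit == 1 in both programs
      rcases hrel with ⟨hp, hv, hlt⟩ | ⟨hp, hv⟩ | ⟨hp, hv, hlt⟩ | ⟨hp, hv⟩ <;> subst hp <;> subst hv
      · have hA : mlt33Step (ys ++ [0], last) b = ((ys ++ [0]) ++ [1], 0) := by
          simp [mlt33Step, hlast, h1, hlt]
        have hB : mlt33AltStep ((0 : Int), ([] : List Int)) b = (1, [1]) := by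
          simp only [mlt33AltStep, h1, if_pos]; rfl
        rw [hA, hB, ih _ 1 0 1 (Or.inr (Or.inl ⟨rfl, rfl⟩)),
            mlt33AltStep_prefix l 1 [1]]
        simp
      · have hA : mlt33Step (ys ++ [1], last) b = ((ys ++ [1]) ++ [0], 1) := by
          simp [mlt33Step, hlast, h1]
        have hB : mlt33AltStep ((1 : Int), ([] : List Int)) b = (2, [0]) := by
          simp only [mlt33AltStep, h1, if_pos]; rfl
        rw [hA, hB, ih _ 0 1 2 (Or.inr (Or.inr (Or.inl ⟨rfl, rfl, by norm_num⟩))),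
            mlt33AltStep_prefix l 2 [0]]
        simp
      · have hA : mlt33Step (ys ++ [0], last) b = ((ys ++ [0]) ++ [-1], 0) := by
          simp [mlt33Step, hlast, h1, hlt]
        have hB : mlt33AltStep ((2 : Int), ([] : List Int)) b = (3, [-1]) := by
          simp only [mlt33AltStep, h1, if_pos]; rfl
        rw [hA, hB, ih _ (-1) 0 3 (Or.inr (Or.inr (Or.inr ⟨rfl, rfl⟩))),
            mlt33AltStep_prefix l 3 [-1]]
        simp
      · have hA : mlt33Step (ys ++ [-1], last) b = ((ys ++ [-1]) ++ [0], -1) := by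
          simp [mlt33Step, hlast, h1]
        have hB : mlt33AltStep ((3 : Int), ([] : List Int)) b = (0, [0]) := by
          simp only [mlt33AltStep, h1, if_pos]; rfl
        rw [hA, hB, ih _ 0 (-1) 0 (Or.inl ⟨rfl, rfl, by norm_num⟩),
            mlt33AltStep_prefix l 0 [0]]
        simp
    · by_cases h0 : b == 0
      · -- bit == 0: both append the current level, state otherwise unchanged
        have hA : mlt33Step (ys ++ [v], last) b = ((ys ++ [v]) ++ [v], last) := by
          simp [mlt33Step, hlast, h1, h0]
        have hlv : PySem.List.pyGetD pvLEVELS phase 0 = v := by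
          rcases hrel with ⟨hp, hv, _⟩ | ⟨hp, hv⟩ | ⟨hp, hv, _⟩ | ⟨hp, hv⟩ <;> subst hp <;> subst hv <;> rfl
        have hB : mlt33AltStep (phase, ([] : List Int)) b = (phase, [v]) := by
          simp [mlt33AltStep, h1, h0, hlv]
        rw [hA, hB, ih _ v last phase hrel, mlt33AltStep_prefix l phase [v]]
        simp
      · -- other bits: both programs skip
        have hA : mlt33Step (ys ++ [v], last) b = (ys ++ [v], last) := by
          simp [mlt33Step, hlast, h1, h0]
        have hB : mlt33AltStep (phase, ([] : List Int)) b = (phase, []) := by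
          simp [mlt33AltStep, h1, h0]
        rw [hA, hB, ih _ v last phase hrel]

-- ===== VERDICT (by name: the statement is the Claim_ definition above) =====
theorem mlt33_spec : Claim_equal_mlt33 := by
  intro l _
  show mlt33 l = mlt33_alt l
  unfold mlt33 mlt33_alt
  rw [show ([0] : List Int) = [] ++ [0] from rfl, key l [] 0 0 0 (Or.inl ⟨rfl, rfl, by norm_num⟩)]
  simp
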